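-- pv_equiv track=rewrite | github.com/ticotheps/Sprint-Challenge--Algorithms | Short-Answer/Algorithms_Answers.py | exercise_b
-- ===== SOURCE A (Python) =====
-- def exercise_b(n):
--     sum = 0
--     operation_counter = 0
--     for i in range(n):
--         operation_counter += 1
--         i += 1
--         for j in range(i + 1, n):
--             operation_counter += 1
--             j += 1
--             for k in range(j + 1, n):
--                 operation_counter += 1
--                 k += 1
--                 for l in range(k + 1, 10 + k):
--                     operation_counter += 1
--                     l += 1
--                     sum += 1
--     return (f"If n = {n}; then the total number of operations is: {operation_counter}")
-- ===== SOURCE B (Python) =====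
-- def exercise_b(n):
--     # Closed form: the counter equals the outer trip count plus the binomial
--     # counts of the two middle loops, with the constant-length innermost loop
--     # folded into the last coefficient.
--     a = max(n - 1, 0)
--     b = max(n - 2, 0)
--     operation_counter = max(n, 0) + a * (a - 1) // 2 + 10 * (b * (b - 1) * (b - 2) // 6)
--     return (f"If n = {n}; then the total number of operations is: {operation_counter}")
-- ===== Notes on version B (the rewrite author's own statement) =====
-- stated objective: faster
-- what changed: Replaced the four nested counting loops by a closed-form polynomial in n evaluated with constant-time integer arithmetic.
import Mathlib
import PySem

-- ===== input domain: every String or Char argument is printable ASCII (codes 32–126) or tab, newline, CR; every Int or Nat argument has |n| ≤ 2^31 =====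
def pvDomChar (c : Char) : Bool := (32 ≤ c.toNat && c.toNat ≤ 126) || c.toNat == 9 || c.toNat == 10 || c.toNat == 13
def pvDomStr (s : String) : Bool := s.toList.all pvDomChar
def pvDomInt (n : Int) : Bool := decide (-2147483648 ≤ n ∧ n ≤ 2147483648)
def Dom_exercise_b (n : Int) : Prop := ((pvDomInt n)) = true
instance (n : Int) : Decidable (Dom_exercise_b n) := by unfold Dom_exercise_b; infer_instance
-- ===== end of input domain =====

-- B replaces A's four nested counting loops by a closed-form polynomial (O(1) vs O(n^3)).

-- ===== PORT A =====
-- loop bodies of A, innermost first (each Python for-loop becomes a foldl; state = (sum, operation_counter))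
def pvA_lbody (st : Int × Int) (_l : Int) : Int × Int :=
  (st.1 + 1, st.2 + 1)          -- operation_counter += 1; l += 1; sum += 1

def pvA_kbody (st : Int × Int) (k : Int) : Int × Int :=
  let oc := st.2 + 1            -- operation_counter += 1
  let k := k + 1                -- k += 1
  (PySem.List.pyRange (k + 1) (10 + k) 1).foldl pvA_lbody (st.1, oc)

def pvA_jbody (n : Int) (st : Int × Int) (j : Int) : Int × Int :=
  let oc := st.2 + 1            -- operation_counter += 1
  let j := j + 1                -- j += 1
  (PySem.List.pyRange (j + 1) n 1).foldl pvA_kbody (st.1, oc)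

def pvA_ibody (n : Int) (st : Int × Int) (i : Int) : Int × Int :=
  let oc := st.2 + 1            -- operation_counter += 1
  let i := i + 1                -- i += 1
  (PySem.List.pyRange (i + 1) n 1).foldl (pvA_jbody n) (st.1, oc)

def exercise_b (n : Int) : String :=
  let st := (PySem.List.pyRange 0 n 1).foldl (pvA_ibody n) ((0 : Int), (0 : Int))
  "If n = " ++ PySem.Int.toStr n ++ "; then the total number of operations is: " ++ PySem.Int.toStr st.2

-- ===== PORT B =====
def exercise_b_alt (n : Int) : String :=
  let a := max (n - 1) 0
  let b := max (n - 2) 0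
  let operation_counter :=
    max n 0 + PySem.Int.floordiv (a * (a - 1)) 2
            + 10 * PySem.Int.floordiv (b * (b - 1) * (b - 2)) 6
  "If n = " ++ PySem.Int.toStr n ++ "; then the total number of operations is: " ++ PySem.Int.toStr operation_counter

-- ===== PRECONDITION & SPEC =====
def Spec_exercise_b (n : Int) (out : String) : Prop := out = exercise_b_alt n
instance (n : Int) (out : String) : Decidable (Spec_exercise_b n out) := by unfold Spec_exercise_b; infer_instance

-- ===== CLAIM (what is proved, stated in full; the proofs are below) =====
def Claim_equal_exercise_b : Prop := ∀ (n : Int), Dom_exercise_b n → Spec_exercise_b n (exercise_b n)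

-- ===== LEMMAS AND PROOFS =====

-- triangular and tetrahedral numbers, recursively (proof-only helpers)
def pvG2 : Nat → Nat
  | 0 => 0
  | d + 1 => pvG2 d + d

def pvG3 : Nat → Nat
  | 0 => 0
  | d + 1 => pvG3 d + pvG2 d

lemma pvG2_shift (x : Int) : pvG2 (x + 1).toNat = x.toNat + pvG2 x.toNat := by
  by_cases h : 0 ≤ x
  · have : (x + 1).toNat = x.toNat + 1 := by omega
    rw [this, pvG2]; omega
  · push_neg at h
    have h1 : (x + 1).toNat = 0 := by omega
    have h2 : x.toNat = 0 := by omega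
    rw [h1, h2]; simp [pvG2]

lemma pvG3_shift (x : Int) : pvG3 (x + 1).toNat = pvG2 x.toNat + pvG3 x.toNat := by
  by_cases h : 0 ≤ x
  · have : (x + 1).toNat = x.toNat + 1 := by omega
    rw [this, pvG3]; omega
  · push_neg at h
    have h1 : (x + 1).toNat = 0 := by omega
    have h2 : x.toNat = 0 := by omega
    rw [h1, h2]; simp [pvG2, pvG3]

lemma pvG2_formula (d : Nat) : (d : Int) * ((d : Int) - 1) = 2 * (pvG2 d : Int) := by
  induction d with
  | zero => simp [pvG2]
  | succ m ih => rw [pvG2]; push_cast; push_cast at ih; linear_combination ih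

lemma pvG3_formula (d : Nat) : (d : Int) * ((d : Int) - 1) * ((d : Int) - 2) = 6 * (pvG3 d : Int) := by
  induction d with
  | zero => simp [pvG3]
  | succ m ih =>
    rw [pvG3]; push_cast; push_cast at ih
    have h2 := pvG2_formula m
    linear_combination ih + 3 * h2

lemma pv_lloop (a b s c : Int) :
    (PySem.List.pyRange a b 1).foldl pvA_lbody (s, c)
      = (s + ((b - a).toNat : Int), c + ((b - a).toNat : Int)) := by
  induction hd : (b - a).toNat generalizing a s c with
  | zero =>
    rw [PySem.List.pyRange_one_eq_nil (by omega)]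
    simp
  | succ d ih =>
    rw [PySem.List.pyRange_one_cons (by omega)]
    rw [List.foldl_cons]
    show (PySem.List.pyRange (a + 1) b 1).foldl pvA_lbody (s + 1, c + 1) = _
    rw [ih (a + 1) (s + 1) (c + 1) (by omega)]
    simp only [Prod.mk.injEq]; constructor <;> omega

lemma pv_kbody_eq (st : Int × Int) (k : Int) : pvA_kbody st k = (st.1 + 9, st.2 + 10) := by
  unfold pvA_kbody
  rw [pv_lloop]
  have h9 : 10 + (k + 1) - (k + 1 + 1) = (9 : Int) := by ring
  rw [h9]
  simp only [Prod.mk.injEq]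
  constructor <;> norm_num <;> ring

lemma pv_kloop (n a s c : Int) :
    (PySem.List.pyRange a n 1).foldl pvA_kbody (s, c)
      = (s + 9 * ((n - a).toNat : Int), c + 10 * ((n - a).toNat : Int)) := by
  induction hd : (n - a).toNat generalizing a s c with
  | zero =>
    rw [PySem.List.pyRange_one_eq_nil (by omega)]
    simp
  | succ d ih =>
    rw [PySem.List.pyRange_one_cons (by omega)]
    rw [List.foldl_cons, pv_kbody_eq]
    rw [ih (a + 1) _ _ (by omega)]
    simp only [Prod.mk.injEq]; constructor <;> omega

lemma pv_jloop (n a s c : Int) :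
    (PySem.List.pyRange a n 1).foldl (pvA_jbody n) (s, c)
      = (s + 9 * (pvG2 (n - a - 1).toNat : Int),
         c + ((n - a).toNat : Int) + 10 * (pvG2 (n - a - 1).toNat : Int)) := by
  induction hd : (n - a).toNat generalizing a s c with
  | zero =>
    rw [PySem.List.pyRange_one_eq_nil (by omega)]
    have h1 : (n - a - 1).toNat = 0 := by omega
    simp [h1, pvG2]
  | succ d ih =>
    rw [PySem.List.pyRange_one_cons (by omega)]
    rw [List.foldl_cons]
    show (PySem.List.pyRange (a + 1) n 1).foldl (pvA_jbody n) (pvA_jbody n (s, c) a) = _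
    have hb : pvA_jbody n (s, c) a
        = (s + 9 * ((n - a - 2).toNat : Int), c + 1 + 10 * ((n - a - 2).toNat : Int)) := by
      unfold pvA_jbody
      rw [pv_kloop]
      simp only [Prod.mk.injEq]; constructor <;> omega
    rw [hb, ih (a + 1) _ _ (by omega)]
    have hg : pvG2 (n - a - 1).toNat = (n - a - 2).toNat + pvG2 (n - a - 2).toNat := by
      have := pvG2_shift (n - a - 2)
      have he : n - a - 2 + 1 = n - a - 1 := by omega
      rwa [he] at this
    have e1 : n - (a + 1) - 1 = n - a - 2 := by ring
    rw [e1, hg]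
    simp only [Prod.mk.injEq]; constructor <;> push_cast <;> omega

lemma pv_iloop (n a s c : Int) :
    (PySem.List.pyRange a n 1).foldl (pvA_ibody n) (s, c)
      = (s + 9 * (pvG3 (n - a - 2).toNat : Int),
         c + ((n - a).toNat : Int) + (pvG2 (n - a - 1).toNat : Int)
           + 10 * (pvG3 (n - a - 2).toNat : Int)) := by
  induction hd : (n - a).toNat generalizing a s c with
  | zero =>
    rw [PySem.List.pyRange_one_eq_nil (by omega)]
    have h1 : (n - a - 1).toNat = 0 := by omega
    have h2 : (n - a - 2).toNat = 0 := by omega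
    simp [h1, h2, pvG2, pvG3]
  | succ d ih =>
    rw [PySem.List.pyRange_one_cons (by omega)]
    rw [List.foldl_cons]
    show (PySem.List.pyRange (a + 1) n 1).foldl (pvA_ibody n) (pvA_ibody n (s, c) a) = _
    have hb : pvA_ibody n (s, c) a
        = (s + 9 * (pvG2 (n - a - 3).toNat : Int),
           c + 1 + ((n - a - 2).toNat : Int) + 10 * (pvG2 (n - a - 3).toNat : Int)) := by
      unfold pvA_ibody
      rw [pv_jloop]
      have e3 : n - (a + 1 + 1) - 1 = n - a - 3 := by ring
      rw [e3]
      simp only [Prod.mk.injEq]; constructor <;> push_cast <;> omega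
    rw [hb, ih (a + 1) _ _ (by omega)]
    have hg2 : pvG2 (n - a - 1).toNat = (n - a - 2).toNat + pvG2 (n - a - 2).toNat := by
      have := pvG2_shift (n - a - 2)
      have he : n - a - 2 + 1 = n - a - 1 := by omega
      rwa [he] at this
    have hg3 : pvG3 (n - a - 2).toNat = pvG2 (n - a - 3).toNat + pvG3 (n - a - 3).toNat := by
      have := pvG3_shift (n - a - 3)
      have he : n - a - 3 + 1 = n - a - 2 := by omega
      rwa [he] at this
    have e1 : n - (a + 1) - 1 = n - a - 2 := by ring
    have e2 : n - (a + 1) - 2 = n - a - 3 := by ring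
    rw [e1, e2, hg2, hg3]
    simp only [Prod.mk.injEq]; constructor <;> push_cast <;> omega

lemma pv_floordiv_two (x : Int) : PySem.Int.floordiv (2 * x) 2 = x := by
  rw [PySem.Int.floordiv_eq_iff_of_pos (by omega)]; omega

lemma pv_floordiv_six (x : Int) : PySem.Int.floordiv (6 * x) 6 = x := by
  rw [PySem.Int.floordiv_eq_iff_of_pos (by omega)]; omega

lemma pv_counter_eq (n : Int) :
    0 + ((n - 0).toNat : Int) + (pvG2 (n - 0 - 1).toNat : Int) + 10 * (pvG3 (n - 0 - 2).toNat : Int)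
      = max n 0 + PySem.Int.floordiv (max (n - 1) 0 * (max (n - 1) 0 - 1)) 2
        + 10 * PySem.Int.floordiv (max (n - 2) 0 * (max (n - 2) 0 - 1) * (max (n - 2) 0 - 2)) 6 := by
  have ha : max (n - 1) 0 = (((n - 1).toNat : Nat) : Int) := by omega
  have hb : max (n - 2) 0 = (((n - 2).toNat : Nat) : Int) := by omega
  rw [ha, hb, pvG2_formula ((n - 1).toNat), pv_floordiv_two,
      pvG3_formula ((n - 2).toNat), pv_floordiv_six]
  simp only [sub_zero]
  omega

-- ===== VERDICT (by name: the statement is the Claim_ definition above) =====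
theorem exercise_b_spec : Claim_equal_exercise_b := by
  intro n _
  show exercise_b n = exercise_b_alt n
  unfold exercise_b exercise_b_alt
  simp only [pv_iloop]
  rw [pv_counter_eq]
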